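-- pv_equiv track=rewrite | github.com/heyhenry/python-problemsolving | 2024/February/Leetcode_round_two/1550.py | threeConsecutive
-- ===== SOURCE A (Python) =====
-- def threeConsecutive(arr : list[int]) -> bool:
--
--     result = False
--     counter = 0
--     for i in arr:
--         if i % 2 != 0:
--             counter += 1
--         else:
--             counter = 0
--         if counter == 3:
--             result = True
--             break
--
--     return result
-- ===== SOURCE B (Python) =====
-- def threeConsecutive(arr : list[int]) -> bool:
--     return any(a % 2 != 0 and b % 2 != 0 and c % 2 != 0
--                for a, b, c in zip(arr, arr[1:], arr[2:]))
-- ===== Notes on version B (the rewrite author's own statement) =====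
-- stated objective: simpler
-- what changed: Replaces the running consecutive-odd counter state machine (with break) by a stateless sliding-window any() over zipped triples (arr, arr[1:], arr[2:]).
import Mathlib
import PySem

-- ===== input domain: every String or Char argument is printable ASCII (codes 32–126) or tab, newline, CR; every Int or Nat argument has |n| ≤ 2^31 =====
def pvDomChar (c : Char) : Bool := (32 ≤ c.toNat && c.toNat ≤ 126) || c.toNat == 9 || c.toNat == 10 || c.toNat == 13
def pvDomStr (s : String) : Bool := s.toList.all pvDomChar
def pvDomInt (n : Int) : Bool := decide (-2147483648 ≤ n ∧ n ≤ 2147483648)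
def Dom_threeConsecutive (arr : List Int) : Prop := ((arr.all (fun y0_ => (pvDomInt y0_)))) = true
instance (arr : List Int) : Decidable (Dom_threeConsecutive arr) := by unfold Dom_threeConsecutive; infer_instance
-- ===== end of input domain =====

-- ===== PORT A =====
-- B replaces A's running consecutive-odd counter (with break) by a stateless sliding-window any() over zipped triples; equal return value on all inputs.
-- loop of A with early break, carrying (result implicit) and counter
def tcAux : List Int → Int → Bool
  | [], _ => false
  | i :: rest, counter =>
    let counter' : Int := if PySem.Int.mod i 2 != 0 then counter + 1 else 0
    if counter' == 3 then true else tcAux rest counter'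

def threeConsecutive (arr : List Int) : Bool := tcAux arr 0

-- ===== PORT B =====
-- any(... for a,b,c in zip(arr, arr[1:], arr[2:]));  arr[1:] = drop 1, arr[2:] = drop 2 (exact, nonnegative slice bounds)
def threeConsecutive_alt (arr : List Int) : Bool :=
  ((arr.zip (arr.drop 1)).zip (arr.drop 2)).any
    (fun p => PySem.Int.mod p.1.1 2 != 0 && PySem.Int.mod p.1.2 2 != 0 && PySem.Int.mod p.2 2 != 0)

-- ===== PRECONDITION & SPEC =====
def Spec_threeConsecutive (arr : List Int) (out : Bool) : Prop := out = threeConsecutive_alt arr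
instance (arr : List Int) (out : Bool) : Decidable (Spec_threeConsecutive arr out) := by unfold Spec_threeConsecutive; infer_instance

-- ===== CLAIM (what is proved, stated in full; the proofs are below) =====
def Claim_equal_threeConsecutive : Prop := ∀ (arr : List Int), Dom_threeConsecutive arr → Spec_threeConsecutive arr (threeConsecutive arr)

-- ===== LEMMAS AND PROOFS =====

def pyOdd (i : Int) : Bool := PySem.Int.mod i 2 != 0

-- value of B's loop when one trailing odd precedes arr
def tcW1 : List Int → Bool
  | a :: b :: r => (pyOdd a && pyOdd b) || threeConsecutive_alt (a :: b :: r)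
  | _ => false

-- value of B's loop when two trailing odds precede arr
def tcW2 : List Int → Bool
  | [] => false
  | a :: r => pyOdd a || tcW1 (a :: r)

theorem alt_nil : threeConsecutive_alt [] = false := rfl
theorem alt_one (a : Int) : threeConsecutive_alt [a] = false := rfl
theorem alt_two (a b : Int) : threeConsecutive_alt [a, b] = false := rfl
theorem alt_cons (a b c : Int) (r : List Int) :
    threeConsecutive_alt (a :: b :: c :: r)
      = ((pyOdd a && pyOdd b && pyOdd c) || threeConsecutive_alt (b :: c :: r)) := by
  simp [threeConsecutive_alt, pyOdd]

theorem tcAux_cons (a : Int) (r : List Int) (cnt : Int) :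
    tcAux (a :: r) cnt
      = if (PySem.Int.mod a 2 != 0) then
          (if ((cnt + 1 : Int) == 3) then true else tcAux r (cnt + 1))
        else tcAux r 0 := by
  by_cases h : (PySem.Int.mod a 2 != 0) = true
  · simp only [tcAux, h, if_true]
  · have h' : (PySem.Int.mod a 2 != 0) = false := by simpa using h
    simp only [tcAux, h']
    norm_num

theorem tcAux_char : ∀ (arr : List Int),
    tcAux arr 0 = threeConsecutive_alt arr ∧ tcAux arr 1 = tcW1 arr ∧ tcAux arr 2 = tcW2 arr := by
  intro arr
  induction arr with
  | nil => exact ⟨rfl, rfl, rfl⟩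
  | cons a r ih =>
    obtain ⟨ih0, ih1, ih2⟩ := ih
    by_cases ha : (PySem.Int.mod a 2 != 0) = true
    · have hodd : pyOdd a = true := ha
      refine ⟨?_, ?_, ?_⟩
      · rw [tcAux_cons, if_pos ha]
        rw [show (((0:Int) + 1 == 3)) = false from rfl, if_neg (by simp),
            show ((0:Int) + 1) = 1 by decide, ih1]
        cases r with
        | nil => simp [tcW1, alt_one]
        | cons b s =>
          cases s with
          | nil => simp [tcW1, alt_two]
          | cons c t => simp [tcW1, alt_cons, hodd]
      · rw [tcAux_cons, if_pos ha]
        rw [show (((1:Int) + 1 == 3)) = false from rfl, if_neg (by simp),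
            show ((1:Int) + 1) = 2 by decide, ih2]
        cases r with
        | nil => simp [tcW1, tcW2]
        | cons b s =>
          by_cases hb : pyOdd b = true
          · cases s with
            | nil => simp [tcW1, tcW2, hb, hodd, alt_two]
            | cons c t => simp [tcW1, tcW2, hb, hodd, alt_cons]
          · have hb' : pyOdd b = false := by simpa using hb
            cases s with
            | nil => simp [tcW1, tcW2, hb', alt_two]
            | cons c t => simp [tcW1, tcW2, hb', alt_cons]
      · rw [tcAux_cons, if_pos ha]
        rw [show (((2:Int) + 1 == 3)) = true from rfl, if_pos rfl]
        simp [tcW2, hodd]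
    · have ha' : pyOdd a = false := by simpa [pyOdd] using ha
      have key : threeConsecutive_alt (a :: r) = threeConsecutive_alt r := by
        cases r with
        | nil => simp [alt_nil, alt_one]
        | cons b s =>
          cases s with
          | nil => simp [alt_two, alt_one]
          | cons c t => simp [alt_cons, ha']
      have step : ∀ (cnt : Int), tcAux (a :: r) cnt = tcAux r 0 := by
        intro cnt
        rw [tcAux_cons, if_neg (by simp [pyOdd] at ha' ⊢; exact ha')]
      have g1 : tcW1 (a :: r) = threeConsecutive_alt r := by
        cases r with
        | nil => simp [tcW1, alt_nil]
        | cons b s => simp [tcW1, ha', key]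
      refine ⟨?_, ?_, ?_⟩
      · rw [step 0, ih0, key]
      · rw [step 1, ih0, g1]
      · rw [step 2, ih0]
        simp [tcW2, ha', g1]

-- ===== VERDICT (by name: the statement is the Claim_ definition above) =====
theorem threeConsecutive_spec : Claim_equal_threeConsecutive := by
  intro arr _
  unfold Spec_threeConsecutive threeConsecutive
  exact (tcAux_char arr).1
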